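-- pv_equiv track=rewrite | github.com/djjbxxz/Proximity-DRL | env_components/topology.py | construct_edges
-- ===== SOURCE A (Python) =====
-- def construct_edges(nodes):
--     lst = []
--     prev = nodes[0]
--     for node in nodes:
--         if prev != node:
--             lst.append((prev, node))
--         prev = node
--     return lst
-- ===== SOURCE B (Python) =====
-- def construct_edges(nodes):
--     # stage 1: collapse runs of equal consecutive elements to their keys
--     keys = []
--     for x in nodes:
--         if not keys or keys[-1] != x:
--             keys.append(x)
--     # stage 2: every adjacent pair of run keys is an edge (consecutive keys always differ)
--     return list(zip(keys, keys[1:]))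
-- ===== Notes on version B (the rewrite author's own statement) =====
-- stated objective: alternative
-- what changed: Two-stage groupby-style computation: first collapse consecutive equal elements into a run-keys list, then pair all adjacent keys with no filtering, instead of A's single running-prev scan that filters differing pairs.
-- crash fix: On the empty list A raises IndexError reading the first element; B returns []. — e.g. on construct_edges([]): A raises IndexError, B returns []
import Mathlib
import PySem

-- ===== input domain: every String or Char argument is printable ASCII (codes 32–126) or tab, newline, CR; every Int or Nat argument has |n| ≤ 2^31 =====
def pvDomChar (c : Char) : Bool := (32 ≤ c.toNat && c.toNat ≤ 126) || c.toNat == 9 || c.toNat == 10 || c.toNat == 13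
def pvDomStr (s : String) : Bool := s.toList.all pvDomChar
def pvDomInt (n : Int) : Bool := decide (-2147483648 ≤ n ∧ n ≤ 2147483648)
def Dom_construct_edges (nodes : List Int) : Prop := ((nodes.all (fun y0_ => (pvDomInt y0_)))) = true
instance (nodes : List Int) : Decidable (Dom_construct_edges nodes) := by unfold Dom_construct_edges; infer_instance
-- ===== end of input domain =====

-- B is a two-stage groupby-style computation (collapse runs to keys, then pair all adjacent keys)
-- instead of A's filtering running-prev scan; return values agree on every non-empty list (A raises IndexError on []).

-- ===== PORT A =====
def construct_edges (nodes : List Int) : List (Int × Int) :=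
  match nodes with
  | [] => []  -- Python raises IndexError reading nodes[0]; excluded by Pre_construct_edges
  | p0 :: _ =>
    (nodes.foldl
      (fun (st : List (Int × Int) × Int) node =>
        (if st.2 ≠ node then st.1 ++ [(st.2, node)] else st.1, node))
      (([] : List (Int × Int)), p0)).1

-- ===== PORT B =====
def construct_edges_alt (nodes : List Int) : List (Int × Int) :=
  let keys := nodes.foldl
    (fun (ks : List Int) x => if ks = [] ∨ ks.getLast? ≠ some x then ks ++ [x] else ks) []
  keys.zip (PySem.List.slice keys (some 1) none)

-- ===== PRECONDITION & SPEC =====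
-- Pre_ excludes exactly the empty list, on which Python A raises IndexError.
def Pre_construct_edges (nodes : List Int) : Prop := nodes ≠ []
instance (nodes : List Int) : Decidable (Pre_construct_edges nodes) := by unfold Pre_construct_edges; infer_instance
def pvWitness_construct_edges : List Int := [1, 2, 2, 3]

-- On the empty list A raises IndexError reading the first element; B returns [].
def Raises_construct_edges (nodes : List Int) : Prop := nodes = []
instance (nodes : List Int) : Decidable (Raises_construct_edges nodes) := by unfold Raises_construct_edges; infer_instance
def pvRaiseWitness_construct_edges : List Int := []
def pvRaiseWitnessOut_construct_edges : List (Int × Int) := []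

def Spec_construct_edges (nodes : List Int) (out : List (Int × Int)) : Prop := out = construct_edges_alt nodes
instance (nodes : List Int) (out : List (Int × Int)) : Decidable (Spec_construct_edges nodes out) := by unfold Spec_construct_edges; infer_instance

-- ===== CLAIM (what is proved, stated in full; the proofs are below) =====
def Claim_equal_construct_edges : Prop := ∀ (nodes : List Int), Dom_construct_edges nodes → Pre_construct_edges nodes → Spec_construct_edges nodes (construct_edges nodes)
def Claim_raises_construct_edges : Prop := (∀ (nodes : List Int), Dom_construct_edges nodes → Raises_construct_edges nodes → ¬ Pre_construct_edges nodes) ∧ (Dom_construct_edges (pvRaiseWitness_construct_edges) ∧ Raises_construct_edges (pvRaiseWitness_construct_edges) ∧ construct_edges_alt (pvRaiseWitness_construct_edges) = pvRaiseWitnessOut_construct_edges)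

-- ===== LEMMAS AND PROOFS =====

-- run keys of xs given the current last key p (proof-side model of B's first stage)
def pvRuns (p : Int) (xs : List Int) : List Int :=
  match xs with
  | [] => []
  | x :: t => if x = p then pvRuns p t else x :: pvRuns x t

-- A's fold from state (acc, p) over xs appends the differing consecutive pairs of p::xs.
theorem construct_edges_fold (xs : List Int) (acc : List (Int × Int)) (p : Int) :
    (xs.foldl
      (fun (st : List (Int × Int) × Int) node =>
        (if st.2 ≠ node then st.1 ++ [(st.2, node)] else st.1, node))
      (acc, p)).1
      = acc ++ ((p :: xs).zip xs).filter (fun q => q.1 != q.2) := by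
  induction xs generalizing acc p with
  | nil => simp
  | cons x xs ih =>
    simp only [List.foldl_cons, List.zip_cons_cons, List.filter_cons]
    rw [ih]
    by_cases h : p = x <;> simp [h]

-- B's first-stage fold from a nonempty accumulator with last key p appends pvRuns p xs.
theorem runs_fold (xs : List Int) (acc : List Int) (p : Int) (h : acc.getLast? = some p) :
    xs.foldl (fun (ks : List Int) x => if ks = [] ∨ ks.getLast? ≠ some x then ks ++ [x] else ks) acc
      = acc ++ pvRuns p xs := by
  induction xs generalizing acc p with
  | nil => simp [pvRuns]
  | cons x t ih =>
    have hacc : acc ≠ [] := by intro hn; simp [hn] at h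
    simp only [List.foldl_cons, pvRuns]
    by_cases hx : x = p
    · have : ¬ (acc = [] ∨ acc.getLast? ≠ some x) := by simp [hacc, h, hx]
      rw [if_neg this, ih acc p h, if_pos hx]
    · have : acc = [] ∨ acc.getLast? ≠ some x := by
        right; rw [h]; simp [Ne.symm hx]
      rw [if_pos this, ih (acc ++ [x]) x (by simp), if_neg hx, List.append_assoc]
      rfl

-- pairing all adjacent run keys = filtering the differing adjacent pairs of the original list
theorem runs_zip (t : List Int) (p : Int) :
    (p :: pvRuns p t).zip (pvRuns p t)
      = ((p :: t).zip t).filter (fun q => q.1 != q.2) := by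
  induction t generalizing p with
  | nil => simp [pvRuns]
  | cons x t' ih =>
    by_cases h : x = p
    · subst h
      have hr : pvRuns x (x :: t') = pvRuns x t' := by simp [pvRuns]
      rw [hr, ih x, List.zip_cons_cons, List.filter_cons]
      simp
    · have hr : pvRuns p (x :: t') = x :: pvRuns x t' := by simp [pvRuns, h]
      rw [hr, List.zip_cons_cons, List.zip_cons_cons, List.filter_cons, ih x]
      simp [Ne.symm h]

-- A on a nonempty list computes the differing adjacent pairs.
theorem construct_edges_eq (p : Int) (t : List Int) :
    construct_edges (p :: t) = ((p :: t).zip t).filter (fun q => q.1 != q.2) := by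
  show (List.foldl _ (([] : List (Int × Int)), p) (p :: t)).1 = _
  rw [List.foldl_cons]
  have h1 : (if ((([] : List (Int × Int)), p)).2 ≠ p then [] ++ [(p, p)] else ([] : List (Int × Int)), p) = (([] : List (Int × Int)), p) := by simp
  rw [h1, construct_edges_fold t [] p, List.nil_append]

-- B on a nonempty list pairs the adjacent run keys.
theorem construct_edges_alt_eq (p : Int) (t : List Int) :
    construct_edges_alt (p :: t) = (p :: pvRuns p t).zip (pvRuns p t) := by
  unfold construct_edges_alt
  have hk : (p :: t).foldl
      (fun (ks : List Int) x => if ks = [] ∨ ks.getLast? ≠ some x then ks ++ [x] else ks) []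
      = p :: pvRuns p t := by
    rw [List.foldl_cons, if_pos (Or.inl rfl), List.nil_append, runs_fold t [p] p (by simp)]
    rfl
  rw [hk]
  show (p :: pvRuns p t).zip (PySem.List.slice (p :: pvRuns p t) (some 1) none) = _
  rw [PySem.List.slice_from_one, List.tail_cons]

theorem construct_edges_spec : Claim_equal_construct_edges := by
  intro nodes _ hpre
  unfold Spec_construct_edges
  match nodes with
  | [] => exact absurd rfl hpre
  | p :: t => rw [construct_edges_eq, construct_edges_alt_eq, runs_zip]

-- ===== VERDICT (by name: the statement is the Claim_ definition above) =====
theorem construct_edges_raises : Claim_raises_construct_edges := by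
  unfold Claim_raises_construct_edges
  exact ⟨fun nodes _ h => by simp [Raises_construct_edges] at h; simp [Pre_construct_edges, h], by decide⟩

-- self-check: the raise witness satisfies Raises_ and B's port returns the stated literal there
theorem construct_edges_raises_witness_ok :
    Raises_construct_edges pvRaiseWitness_construct_edges ∧
      construct_edges_alt pvRaiseWitness_construct_edges = pvRaiseWitnessOut_construct_edges :=
  ⟨construct_edges_raises.2.2.1, construct_edges_raises.2.2.2⟩
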